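-- pv_equiv track=rewrite | github.com/Connor-Tluck/sign_analysis | Sign_Conflation/report.py | get_category_from_mutcd
-- ===== SOURCE A (Python) =====
-- SIGN_CATEGORY_PREFIXES = {
--     "R-": "R-Series (Regulatory Signs)",
--     "W-": "W-Series (Warning Signs)",
--     "M-": "M-Series (Mileposts & Reference Markers)",
--     "I-": "I-Series (Interstate & Freeway Signs)",
--     "D-": "D-Series (Guide Signs for Cities & Destinations)",
--     "G-": "G-Series (General Guide Signs)",
--     "E-": "E-Series (Expressway & Freeway Guide Signs)",
--     "S-": "S-Series (School Zone Signs)",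
--     "OM": "OM-Series (Object Markers)",
--     "PR": "PR-Series (Parking & Rest Area Signs)",
--     "RR": "RR-Series (Railroad Crossing Signs)"
-- }
--
-- def get_category_from_mutcd(mutcd_code):
--     if not isinstance(mutcd_code, str):
--         return "Unknown"
--     code_upper = mutcd_code.upper().replace(" ", "")
--     for prefix, category_name in SIGN_CATEGORY_PREFIXES.items():
--         if code_upper.startswith(prefix):
--             return category_name
--         if code_upper and code_upper[0] == prefix[0] and len(code_upper) > 1 and code_upper[1].isdigit():
--             return category_name
--     return "Unknown"
-- ===== SOURCE B (Python) =====
-- SIGN_CATEGORY_PREFIXES = {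
--     "R-": "R-Series (Regulatory Signs)",
--     "W-": "W-Series (Warning Signs)",
--     "M-": "M-Series (Mileposts & Reference Markers)",
--     "I-": "I-Series (Interstate & Freeway Signs)",
--     "D-": "D-Series (Guide Signs for Cities & Destinations)",
--     "G-": "G-Series (General Guide Signs)",
--     "E-": "E-Series (Expressway & Freeway Guide Signs)",
--     "S-": "S-Series (School Zone Signs)",
--     "OM": "OM-Series (Object Markers)",
--     "PR": "PR-Series (Parking & Rest Area Signs)",
--     "RR": "RR-Series (Railroad Crossing Signs)"
-- }
--
-- # Category by first letter, first occurrence winning ("R-" before "RR").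
-- FIRST_LETTER_CATEGORY = {
--     "R": "R-Series (Regulatory Signs)",
--     "W": "W-Series (Warning Signs)",
--     "M": "M-Series (Mileposts & Reference Markers)",
--     "I": "I-Series (Interstate & Freeway Signs)",
--     "D": "D-Series (Guide Signs for Cities & Destinations)",
--     "G": "G-Series (General Guide Signs)",
--     "E": "E-Series (Expressway & Freeway Guide Signs)",
--     "S": "S-Series (School Zone Signs)",
--     "O": "OM-Series (Object Markers)",
--     "P": "PR-Series (Parking & Rest Area Signs)"
-- }
--
-- def get_category_from_mutcd(mutcd_code):
--     if not isinstance(mutcd_code, str):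
--         return "Unknown"
--     code_upper = mutcd_code.upper().replace(" ", "")
--     # If the second character is a digit, no two-character prefix can match
--     # (their second characters are '-', 'M', 'R'), so only the letter rule applies.
--     if len(code_upper) > 1 and code_upper[1].isdigit():
--         return FIRST_LETTER_CATEGORY.get(code_upper[0], "Unknown")
--     # Otherwise only the startswith rule can ever fire.
--     for prefix, category_name in SIGN_CATEGORY_PREFIXES.items():
--         if code_upper.startswith(prefix):
--             return category_name
--     return "Unknown"
-- ===== Notes on version B (the rewrite author's own statement) =====
-- stated objective: simpler
-- what changed: The interleaved loop with two checks per prefix is split into a digit branch answered by a precomputed first-letter lookup table (first occurrence wins) and a plain startswith-only loop, exploiting that the two original conditions are mutually exclusive on the second character.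
import Mathlib
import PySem

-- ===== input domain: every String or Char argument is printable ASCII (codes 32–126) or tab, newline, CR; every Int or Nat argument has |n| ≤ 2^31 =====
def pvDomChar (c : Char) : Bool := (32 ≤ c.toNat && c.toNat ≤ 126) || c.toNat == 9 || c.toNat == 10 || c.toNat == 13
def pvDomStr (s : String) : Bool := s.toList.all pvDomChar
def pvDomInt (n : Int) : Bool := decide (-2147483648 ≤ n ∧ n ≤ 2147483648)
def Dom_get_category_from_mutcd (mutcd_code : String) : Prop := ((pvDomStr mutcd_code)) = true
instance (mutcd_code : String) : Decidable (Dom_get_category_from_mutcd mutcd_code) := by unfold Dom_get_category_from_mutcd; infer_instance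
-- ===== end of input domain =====

-- B replaces A's single loop with two per-pfx checks by a digit-branch decomposition:
-- a precomputed first-letter table for codes whose second character is a digit, and a
-- startswith-only loop otherwise (objective: simpler).


-- ===== PORT A =====
-- SIGN_CATEGORY_PREFIXES (a dict iterated over .items(): its items in insertion order)
def pvPrefixes : List (String × String) :=
  [("R-", "R-Series (Regulatory Signs)"),
   ("W-", "W-Series (Warning Signs)"),
   ("M-", "M-Series (Mileposts & Reference Markers)"),
   ("I-", "I-Series (Interstate & Freeway Signs)"),
   ("D-", "D-Series (Guide Signs for Cities & Destinations)"),
   ("G-", "G-Series (General Guide Signs)"),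
   ("E-", "E-Series (Expressway & Freeway Guide Signs)"),
   ("S-", "S-Series (School Zone Signs)"),
   ("OM", "OM-Series (Object Markers)"),
   ("PR", "PR-Series (Parking & Rest Area Signs)"),
   ("RR", "RR-Series (Railroad Crossing Signs)")]

-- A's second condition: code_upper and code_upper[0] == prefix[0] and len(code_upper) > 1 and code_upper[1].isdigit()
def pvSecondCond (code pfx : List Char) : Bool :=
  !code.isEmpty
    && (PySem.List.pyGet? code 0 == PySem.List.pyGet? pfx 0)
    && decide (1 < code.length)
    && (match PySem.List.pyGet? code 1 with
        | some c => PySem.Chars.isdigit c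
        | none => false)

-- A's 'for pfx, category_name in SIGN_CATEGORY_PREFIXES.items(): …'
def pvLoopA (code : List Char) : List (String × String) → String
  | [] => "Unknown"
  | (pfx, category_name) :: rest =>
    if PySem.Chars.startswith code pfx.toList then category_name
    else if pvSecondCond code pfx.toList then category_name
    else pvLoopA code rest

def get_category_from_mutcd (mutcd_code : String) : String :=
  let code_upper := PySem.Str.replace (PySem.Str.upper mutcd_code) " " ""
  pvLoopA code_upper.toList pvPrefixes

-- ===== PORT B =====
-- FIRST_LETTER_CATEGORY
def pvFirstLetter : PySem.Dict Char String :=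
  PySem.Dict.ofList
    [('R', "R-Series (Regulatory Signs)"),
     ('W', "W-Series (Warning Signs)"),
     ('M', "M-Series (Mileposts & Reference Markers)"),
     ('I', "I-Series (Interstate & Freeway Signs)"),
     ('D', "D-Series (Guide Signs for Cities & Destinations)"),
     ('G', "G-Series (General Guide Signs)"),
     ('E', "E-Series (Expressway & Freeway Guide Signs)"),
     ('S', "S-Series (School Zone Signs)"),
     ('O', "OM-Series (Object Markers)"),
     ('P', "PR-Series (Parking & Rest Area Signs)")]

-- B's startswith-only loop
def pvLoopB (code : List Char) : List (String × String) → String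
  | [] => "Unknown"
  | (pfx, category_name) :: rest =>
    if PySem.Chars.startswith code pfx.toList then category_name
    else pvLoopB code rest

def get_category_from_mutcd_alt (mutcd_code : String) : String :=
  let code_upper := PySem.Str.replace (PySem.Str.upper mutcd_code) " " ""
  let code := code_upper.toList
  if decide (1 < code.length)
      && (match PySem.List.pyGet? code 1 with
          | some c => PySem.Chars.isdigit c
          | none => false) then
    match PySem.List.pyGet? code 0 with
    | some c => pvFirstLetter.getD c "Unknown"
    | none => "Unknown"     -- unreachable: len > 1
  else
    pvLoopB code pvPrefixes

-- ===== PRECONDITION & SPEC =====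
def Spec_get_category_from_mutcd (mutcd_code : String) (out : String) : Prop := out = get_category_from_mutcd_alt mutcd_code
instance (mutcd_code : String) (out : String) : Decidable (Spec_get_category_from_mutcd mutcd_code out) := by unfold Spec_get_category_from_mutcd; infer_instance

-- ===== CLAIM (what is proved, stated in full; the proofs are below) =====
def Claim_equal_get_category_from_mutcd : Prop := ∀ (mutcd_code : String), Dom_get_category_from_mutcd mutcd_code → Spec_get_category_from_mutcd mutcd_code (get_category_from_mutcd mutcd_code)

-- ===== LEMMAS AND PROOFS =====

-- When the second condition is false for every pfx, A's loop is B's loop.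
theorem pvLoopA_eq_loopB (code : List Char)
    (h : ∀ p : List Char, pvSecondCond code p = false) :
    ∀ l, pvLoopA code l = pvLoopB code l := by
  intro l
  induction l with
  | nil => rfl
  | cons hd tl ih =>
    obtain ⟨p, c⟩ := hd
    simp [pvLoopA, pvLoopB, h p.toList, ih]

theorem pv_digit_ne (b : Char) (h : PySem.Chars.isdigit b = true) (c : Char)
    (hc : c.toNat < 48 ∨ 57 < c.toNat) : (c == b) = false := by
  simp only [PySem.Chars.isdigit, Bool.and_eq_true, decide_eq_true_eq] at h
  have h0 : 48 ≤ b.toNat := h.1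
  have h9 : b.toNat ≤ 57 := h.2
  simp only [beq_eq_false_iff_ne, ne_eq]
  intro hcb
  subst hcb
  omega

theorem pv_core (code : List Char) : pvLoopA code pvPrefixes =
    (if decide (1 < code.length)
        && (match PySem.List.pyGet? code 1 with
            | some c => PySem.Chars.isdigit c
            | none => false) then
      match PySem.List.pyGet? code 0 with
      | some c => pvFirstLetter.getD c "Unknown"
      | none => "Unknown"
    else pvLoopB code pvPrefixes) := by
  match code with
  | [] =>
    rw [pvLoopA_eq_loopB]
    · simp
    · intro p; simp [pvSecondCond]
  | [a] =>
    rw [pvLoopA_eq_loopB]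
    · simp
    · intro p; simp [pvSecondCond]
  | a :: b :: rest =>
    by_cases hd : PySem.Chars.isdigit b = true
    · -- the startswith tests all fail on their second character, a non-digit
      have hne : ∀ c : Char, c.toNat < 48 ∨ 57 < c.toNat → (c == b) = false :=
        fun c hc => pv_digit_ne b hd c hc
      have h1 := hne '-' (by decide)
      have h2 := hne 'M' (by decide)
      have h3 := hne 'R' (by decide)
      simp [pvLoopA, pvPrefixes, pvSecondCond, pvFirstLetter,
            PySem.Chars.startswith, List.isPrefixOf,
            PySem.Dict.getD, PySem.Dict.get?, PySem.Dict.ofList,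
            PySem.Dict.empty, PySem.Dict.update, PySem.Dict.insert,
            PySem.Dict.items, h1, h2, h3, hd]
      split_ifs <;>
        simp_all [show ∀ c a : Char, (c == a) = (a == c) from fun c a => Bool.beq_comm, beq_iff_eq,
                  List.find?_cons_of_pos, List.find?_cons_of_neg]
    · have hd' : PySem.Chars.isdigit b = false := by
        cases h : PySem.Chars.isdigit b with
        | false => rfl
        | true => exact absurd h hd
      rw [pvLoopA_eq_loopB]
      · simp [hd']
      · intro p
        simp [pvSecondCond, hd']

-- ===== VERDICT (by name: the statement is the Claim_ definition above) =====
theorem get_category_from_mutcd_spec : Claim_equal_get_category_from_mutcd := by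
  intro s _
  unfold Spec_get_category_from_mutcd get_category_from_mutcd get_category_from_mutcd_alt
  exact pv_core _
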